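-- pv_equiv track=rewrite | github.com/RaminKasumov/EPROG_2025 | UE8/integer_bisection.py | contains_zero
-- ===== SOURCE A (Python) =====
-- def contains_zero(vec):
--     left, right = 0, len(vec)-1
--
--     while left <= right:
--         mid = (left + right) // 2
--         if vec[mid] == 0:
--             return True
--         elif vec[mid] > 0:
--             right = mid - 1
--         else:
--             left = mid + 1
--
--     return False
-- ===== SOURCE B (Python) =====
-- def contains_zero(vec):
--     def go(seg):
--         if not seg:
--             return False
--         mid = (len(seg) - 1) // 2
--         if seg[mid] == 0:
--             return True
--         elif seg[mid] > 0:
--             return go(seg[:mid])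
--         else:
--             return go(seg[mid+1:])
--     return go(vec[:])
-- ===== Notes on version B (the rewrite author's own statement) =====
-- stated objective: alternative
-- what changed: Replaces the iterative while-loop over (left, right) index bounds with a recursive helper over list slices: each step probes the midpoint of the current segment and recurses on seg[:mid] or seg[mid+1:], with no index bookkeeping.
import Mathlib
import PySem

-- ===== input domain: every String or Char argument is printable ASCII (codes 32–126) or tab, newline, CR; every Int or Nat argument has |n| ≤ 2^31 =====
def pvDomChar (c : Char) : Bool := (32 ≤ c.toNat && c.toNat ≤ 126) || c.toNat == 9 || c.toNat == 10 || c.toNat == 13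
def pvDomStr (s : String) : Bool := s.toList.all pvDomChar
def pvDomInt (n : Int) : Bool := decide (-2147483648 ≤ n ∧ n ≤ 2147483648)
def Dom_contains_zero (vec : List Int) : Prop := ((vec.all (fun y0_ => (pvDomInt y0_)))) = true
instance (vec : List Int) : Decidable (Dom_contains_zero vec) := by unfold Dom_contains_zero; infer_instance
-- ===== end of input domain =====

-- B replaces A's iterative (left, right) index-bound loop with recursion on list slices; same probes, same results (objective: alternative, not faster).

-- ===== PORT A =====
-- A's while-loop over the state (left, right); the Nat fuel only makes the recursion
-- structural (each iteration shrinks right-left by at least 1, so vec.length fuel never runs out).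
def containsZeroLoop (vec : List Int) : Nat → Int → Int → Bool
  | 0, _, _ => false
  | fuel + 1, left, right =>
    if left ≤ right then
      let mid := PySem.Int.floordiv (left + right) 2
      match PySem.List.pyGet? vec mid with
      | none => false  -- vec[mid] would raise IndexError; unreachable from contains_zero's call (0 ≤ left ∧ right < len is invariant)
      | some v =>
        if v = 0 then true
        else if v > 0 then containsZeroLoop vec fuel left (mid - 1)
        else containsZeroLoop vec fuel (mid + 1) right
    else false

def contains_zero (vec : List Int) : Bool :=
  containsZeroLoop vec vec.length 0 ((vec.length : Int) - 1)

-- ===== PORT B =====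
-- Source B's helper go: recursion on the current segment (a list slice); the Nat fuel only makes
-- the recursion structural (each call recurses on a strictly shorter slice).
def containsZeroSeg : Nat → List Int → Bool
  | 0, _ => false
  | fuel + 1, seg =>
    if seg = [] then false
    else
      let mid := PySem.Int.floordiv ((seg.length : Int) - 1) 2
      match PySem.List.pyGet? seg mid with
      | none => false  -- seg[mid] would raise IndexError; unreachable (0 ≤ mid < seg.length)
      | some v =>
        if v = 0 then true
        else if v > 0 then containsZeroSeg fuel (PySem.List.slice seg none (some mid))
        else containsZeroSeg fuel (PySem.List.slice seg (some (mid + 1)) none)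

def contains_zero_alt (vec : List Int) : Bool :=
  containsZeroSeg vec.length (PySem.List.slice vec none none)

-- ===== PRECONDITION & SPEC =====
def Spec_contains_zero (vec : List Int) (out : Bool) : Prop := out = contains_zero_alt vec
instance (vec : List Int) (out : Bool) : Decidable (Spec_contains_zero vec out) := by unfold Spec_contains_zero; infer_instance

-- ===== CLAIM (what is proved, stated in full; the proofs are below) =====
def Claim_equal_contains_zero : Prop := ∀ (vec : List Int), Dom_contains_zero vec → Spec_contains_zero vec (contains_zero vec)

-- ===== LEMMAS AND PROOFS =====

-- The loop on bounds (left, right) computes exactly what the slice recursion computes on the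
-- segment vec[left .. right], for any common fuel that covers the segment size.
theorem loop_eq_seg_aux (vec : List Int) : ∀ (n : Nat) (left right : Int),
    (right + 1 - left).toNat ≤ n → 0 ≤ left → right < (vec.length : Int) →
    containsZeroLoop vec n left right =
      containsZeroSeg n ((vec.drop left.toNat).take (right + 1 - left).toNat) := by
  intro n
  induction n with
  | zero => intro left right hn hl hr; rfl
  | succ n ih =>
    intro left right hn hl hr
    by_cases hlr : left ≤ right
    · rw [containsZeroLoop, containsZeroSeg]
      set k := (right + 1 - left).toNat with hk
      have hfd1 : PySem.Int.floordiv (left + right) 2 = (left + right) / 2 :=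
        PySem.Int.floordiv_eq_ediv_of_pos (by norm_num)
      have hseglen : ((vec.drop left.toNat).take k).length = k := by
        simp [List.length_take, List.length_drop]; omega
      have hne : (vec.drop left.toNat).take k ≠ [] := by
        intro h
        rw [← List.length_eq_zero_iff, hseglen] at h
        omega
      have hfd2 : PySem.Int.floordiv ((((vec.drop left.toNat).take k).length : Int) - 1) 2
          = ((k : Int) - 1) / 2 := by
        rw [hseglen]; exact PySem.Int.floordiv_eq_ediv_of_pos (by norm_num)
      have hm1 : PySem.List.pyGet? vec ((left + right) / 2)
          = vec[((left + right) / 2).toNat]? :=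
        PySem.List.pyGet?_of_nonneg _ (by omega)
      have hm2 : PySem.List.pyGet? ((vec.drop left.toNat).take k) (((k : Int) - 1) / 2)
          = vec[((left + right) / 2).toNat]? := by
        rw [PySem.List.pyGet?_of_nonneg _ (by omega),
            List.getElem?_take_of_lt (by omega), List.getElem?_drop]
        congr 1
        omega
      obtain ⟨x, hx⟩ : ∃ x, vec[((left + right) / 2).toNat]? = some x :=
        ⟨_, List.getElem?_eq_getElem (by omega)⟩
      simp only [hfd1, hfd2, hm1, hm2, hx, if_pos hlr, if_neg hne]
      by_cases hx0 : x = 0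
      · simp [hx0]
      · by_cases hxp : x > 0
        · simp only [if_neg hx0, if_pos hxp]
          rw [PySem.List.slice_to _ (by omega)]
          rw [ih left ((left + right) / 2 - 1) (by omega) hl (by omega)]
          rw [List.take_take]
          have harg : ((left + right) / 2 - 1 + 1 - left).toNat
              = min (((k : Int) - 1) / 2).toNat k := by omega
          rw [harg]
        · simp only [if_neg hx0, if_neg hxp]
          rw [PySem.List.slice_from _ (by omega)]
          rw [ih ((left + right) / 2 + 1) right (by omega) (by omega) hr]
          rw [List.drop_take, List.drop_drop]
          have harg1 : (right + 1 - ((left + right) / 2 + 1)).toNat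
              = k - (((k : Int) - 1) / 2 + 1).toNat := by omega
          have harg2 : ((left + right) / 2 + 1).toNat
              = left.toNat + (((k : Int) - 1) / 2 + 1).toNat := by omega
          rw [harg1, harg2]
    · rw [containsZeroLoop, containsZeroSeg]
      simp [hlr, show (right + 1 - left).toNat = 0 from by omega]

theorem contains_zero_spec : Claim_equal_contains_zero := by
  intro vec _
  unfold Spec_contains_zero contains_zero contains_zero_alt
  rw [PySem.List.slice_none_none,
      loop_eq_seg_aux vec vec.length 0 ((vec.length : Int) - 1) (by omega) le_rfl (by omega)]
  simp
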